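-- pv_equiv track=rewrite | github.com/hub-bla/sorting_algo | test.py | V_shaped_data
-- ===== SOURCE A (Python) =====
-- def V_shaped_data(length):
--     n = length//2
--     arr = []
--     for j in range(length-n, 0, -1):
--         arr.append(j)
--     for i in range(1, n+1):
--         arr.append(i)
--
--     return arr
-- ===== SOURCE B (Python) =====
-- def V_shaped_data(length):
--     c = length - length // 2
--     return [c - i if i < c else i - c + 1 for i in range(length)]
-- ===== Notes on version B (the rewrite author's own statement) =====
-- stated objective: simpler
-- what changed: Replaces the two separate descending/ascending append loops with a single comprehension over range(length) using an index formula (c - i before the midpoint c = length - length//2, i - c + 1 after).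
import Mathlib
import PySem

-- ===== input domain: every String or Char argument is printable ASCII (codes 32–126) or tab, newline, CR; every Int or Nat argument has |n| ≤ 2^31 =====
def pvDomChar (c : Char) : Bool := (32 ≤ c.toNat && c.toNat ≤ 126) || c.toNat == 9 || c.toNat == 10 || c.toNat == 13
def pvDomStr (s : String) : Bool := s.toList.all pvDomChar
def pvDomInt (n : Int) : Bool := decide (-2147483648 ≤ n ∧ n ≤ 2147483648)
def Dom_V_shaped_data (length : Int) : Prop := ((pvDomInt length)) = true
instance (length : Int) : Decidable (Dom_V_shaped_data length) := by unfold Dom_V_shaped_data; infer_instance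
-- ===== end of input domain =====

-- ===== PORT A =====
-- B replaces A's two append loops with one index-formula comprehension (objective: simpler); same O(n) cost.
def V_shaped_data (length : Int) : List Int :=
  let n := PySem.Int.floordiv length 2
  let arr : List Int := []
  let arr := (PySem.List.pyRange (length - n) 0 (-1)).foldl (fun arr j => arr ++ [j]) arr
  let arr := (PySem.List.pyRange 1 (n + 1) 1).foldl (fun arr i => arr ++ [i]) arr
  arr

-- ===== PORT B =====
def V_shaped_data_alt (length : Int) : List Int :=
  let c := length - PySem.Int.floordiv length 2
  (PySem.List.pyRange 0 length 1).map (fun i => if i < c then c - i else i - c + 1)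

-- ===== PRECONDITION & SPEC =====
def Spec_V_shaped_data (length : Int) (out : List Int) : Prop := out = V_shaped_data_alt length
instance (length : Int) (out : List Int) : Decidable (Spec_V_shaped_data length out) := by unfold Spec_V_shaped_data; infer_instance

-- ===== CLAIM (what is proved, stated in full; the proofs are below) =====
def Claim_equal_V_shaped_data : Prop := ∀ (length : Int), Dom_V_shaped_data length → Spec_V_shaped_data length (V_shaped_data length)

-- ===== LEMMAS AND PROOFS =====

theorem V_ports_eq (length : Int) : V_shaped_data length = V_shaped_data_alt length := by
  unfold V_shaped_data V_shaped_data_alt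
  simp only [PySem.List.foldl_append_singleton, List.nil_append]
  have hdm := PySem.Int.floordiv_mul_add_mod length 2
  have hr0 := PySem.Int.mod_nonneg length (b := 2) (by norm_num)
  have hr2 := PySem.Int.mod_lt length (b := 2) (by norm_num)
  set n := PySem.Int.floordiv length 2 with hn
  by_cases hpos : 0 < length
  · have h0c : (0:Int) ≤ length - n := by omega
    have hcl : length - n ≤ length := by omega
    rw [PySem.List.pyRange_one_append 0 (length - n) length h0c hcl, List.map_append]
    congr 1
    · rw [PySem.List.pyRange_neg_one, PySem.List.pyRange_one]
      simp only [List.map_map, sub_zero]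
      apply List.map_congr_left
      intro k hk
      rw [List.mem_range] at hk
      have hlt : (0:Int) + (k : Int) < length - n := by
        have := Int.toNat_of_nonneg h0c
        omega
      simp only [Function.comp_apply, if_pos hlt]
      omega
    · rw [PySem.List.pyRange_one, PySem.List.pyRange_one]
      have he : (length - (length - n)).toNat = (n + 1 - 1).toNat := by omega
      rw [he]
      simp only [List.map_map]
      apply List.map_congr_left
      intro k hk
      have hnot : ¬ (length - n + (k:Int) < length - n) := by omega
      simp only [Function.comp_apply, if_neg hnot]
      omega
  · have h1 : PySem.List.pyRange (length - n) 0 (-1) = [] :=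
      PySem.List.pyRange_neg_one_eq_nil (by omega)
    have h2 : PySem.List.pyRange 1 (n + 1) 1 = [] :=
      PySem.List.pyRange_one_eq_nil (by omega)
    have h3 : PySem.List.pyRange 0 length 1 = [] :=
      PySem.List.pyRange_one_eq_nil (by omega)
    simp [h1, h2, h3]

-- ===== VERDICT (by name: the statement is the Claim_ definition above) =====
theorem V_shaped_data_spec : Claim_equal_V_shaped_data := by
  intro length _
  unfold Spec_V_shaped_data
  exact V_ports_eq length
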